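-- pv_equiv track=rewrite | github.com/bradAGI/web-stable-diffusion | web_stable_diffusion/models/miniturbo_omnimodal.py | _prompt_knowledge
-- ===== SOURCE A (Python) =====
-- from typing import Any, Dict, Iterable, Iterator, List, Mapping, MutableMapping, Optional, Sequence, Set, Tuple, Union
--
-- KnowledgeBase = Mapping[str, Sequence[str]]
--
-- def _tokenise(prompt: str) -> List[str]:
--     return [token.lower() for token in prompt.replace("-", " ").replace("_", " ").split() if token]
--
-- def _prompt_knowledge(prompt: str) -> Tuple[KnowledgeBase, Set[str]]:
--     tokens = _tokenise(prompt)
--     facts = {f"token:{token}" for token in tokens}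
--     knowledge: Dict[str, Sequence[str]] = {}
--     if any(token in {"night", "dark", "moon"} for token in tokens):
--         knowledge["theme:night"] = [f"token:{token}" for token in tokens if token in {"night", "moon"}]
--     if any(token in {"sun", "dawn", "bright"} for token in tokens):
--         knowledge["theme:day"] = [f"token:{token}" for token in tokens if token in {"sun", "dawn", "bright"}]
--     if any(token in {"water", "lake", "river", "ocean"} for token in tokens):
--         knowledge["element:water"] = [f"token:{token}" for token in tokens if token in {"water", "lake", "river", "ocean"}]
--     if any(token in {"mountain", "rock", "stone"} for token in tokens):
--         knowledge["element:earth"] = [f"token:{token}" for token in tokens if token in {"mountain", "rock", "stone"}]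
--     if any(token in {"calm", "serene", "quiet"} for token in tokens):
--         knowledge["mood:calm"] = [f"token:{token}" for token in tokens if token in {"calm", "serene", "quiet"}]
--     if any(token in {"storm", "loud", "intense"} for token in tokens):
--         knowledge["mood:intense"] = [f"token:{token}" for token in tokens if token in {"storm", "loud", "intense"}]
--     return knowledge, facts
-- ===== SOURCE B (Python) =====
-- from typing import Dict, List, Mapping, Sequence, Set, Tuple
--
-- KnowledgeBase = Mapping[str, Sequence[str]]
--
-- def _tokenise(prompt: str) -> List[str]:
--     return [token.lower() for token in prompt.replace("-", " ").replace("_", " ").split() if token]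
--
-- # one table row per output key: (key, trigger set, collect set)
-- _TABLE = [
--     ("theme:night", ("night", "dark", "moon"), ("night", "moon")),
--     ("theme:day", ("sun", "dawn", "bright"), ("sun", "dawn", "bright")),
--     ("element:water", ("water", "lake", "river", "ocean"), ("water", "lake", "river", "ocean")),
--     ("element:earth", ("mountain", "rock", "stone"), ("mountain", "rock", "stone")),
--     ("mood:calm", ("calm", "serene", "quiet"), ("calm", "serene", "quiet")),
--     ("mood:intense", ("storm", "loud", "intense"), ("storm", "loud", "intense")),
-- ]
--
-- def _prompt_knowledge(prompt: str) -> Tuple[KnowledgeBase, Set[str]]: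
--     tokens = _tokenise(prompt)
--     state = [[key, trig, coll, False, []] for (key, trig, coll) in _TABLE]
--     for tok in tokens:
--         fact = f"token:{tok}"
--         for entry in state:
--             if tok in entry[1]:
--                 entry[3] = True
--             if tok in entry[2]:
--                 entry[4].append(fact)
--     knowledge: Dict[str, Sequence[str]] = {e[0]: e[4] for e in state if e[3]}
--     facts = {f"token:{tok}" for tok in tokens}
--     return knowledge, facts
-- ===== Notes on version B (the rewrite author's own statement) =====
-- stated objective: idiomatic
-- what changed: B replaces the six copy-pasted category blocks (each doing its own any-scan plus a filter pass over the tokens) by a data table of (key, trigger set, collect set) rows and a single pass over the tokens that updates all categories' triggered flags and collected lists at once, then emits the dict from the table state.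
import Mathlib
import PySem

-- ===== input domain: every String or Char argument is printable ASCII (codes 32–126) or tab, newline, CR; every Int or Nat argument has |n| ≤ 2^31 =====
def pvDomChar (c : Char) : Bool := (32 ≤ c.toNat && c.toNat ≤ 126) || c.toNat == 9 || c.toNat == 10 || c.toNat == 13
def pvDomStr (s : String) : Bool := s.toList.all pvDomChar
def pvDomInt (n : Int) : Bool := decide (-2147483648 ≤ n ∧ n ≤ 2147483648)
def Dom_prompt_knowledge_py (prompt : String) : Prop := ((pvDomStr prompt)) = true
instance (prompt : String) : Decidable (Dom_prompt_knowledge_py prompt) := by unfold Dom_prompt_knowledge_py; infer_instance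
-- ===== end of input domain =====

-- B re-states the six hard-coded category blocks as a data table and makes ONE pass over the
-- tokens updating all categories at once (objective: idiomatic/alternative, same asymptotic cost).

-- shared module helper _tokenise (identical in both Pythons)
def pvTokenise (prompt : String) : List String :=
  ((PySem.Str.split₀ (PySem.Str.replace (PySem.Str.replace prompt "-" " ") "_" " ")).filter
    (fun token => !(token == ""))).map PySem.Str.lower

-- ===== PORT A =====
def prompt_knowledge_py (prompt : String) : (List (String × List String)) × List String :=
  let tokens := pvTokenise prompt
  let facts : PySem.Set String := PySem.Set.ofList (tokens.map (fun token => "token:" ++ token))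
  let knowledge : PySem.Dict String (List String) := PySem.Dict.empty
  let knowledge :=
    if tokens.any (fun token => (["night", "dark", "moon"] : List String).contains token) then
      knowledge.insert "theme:night"
        ((tokens.filter (fun token => (["night", "moon"] : List String).contains token)).map
          (fun token => "token:" ++ token))
    else knowledge
  let knowledge :=
    if tokens.any (fun token => (["sun", "dawn", "bright"] : List String).contains token) then
      knowledge.insert "theme:day"
        ((tokens.filter (fun token => (["sun", "dawn", "bright"] : List String).contains token)).map
          (fun token => "token:" ++ token))
    else knowledge
  let knowledge :=
    if tokens.any (fun token => (["water", "lake", "river", "ocean"] : List String).contains token) then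
      knowledge.insert "element:water"
        ((tokens.filter (fun token => (["water", "lake", "river", "ocean"] : List String).contains token)).map
          (fun token => "token:" ++ token))
    else knowledge
  let knowledge :=
    if tokens.any (fun token => (["mountain", "rock", "stone"] : List String).contains token) then
      knowledge.insert "element:earth"
        ((tokens.filter (fun token => (["mountain", "rock", "stone"] : List String).contains token)).map
          (fun token => "token:" ++ token))
    else knowledge
  let knowledge :=
    if tokens.any (fun token => (["calm", "serene", "quiet"] : List String).contains token) then
      knowledge.insert "mood:calm"
        ((tokens.filter (fun token => (["calm", "serene", "quiet"] : List String).contains token)).map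
          (fun token => "token:" ++ token))
    else knowledge
  let knowledge :=
    if tokens.any (fun token => (["storm", "loud", "intense"] : List String).contains token) then
      knowledge.insert "mood:intense"
        ((tokens.filter (fun token => (["storm", "loud", "intense"] : List String).contains token)).map
          (fun token => "token:" ++ token))
    else knowledge
  (knowledge.items, facts)

-- ===== PORT B =====
-- the table _TABLE of Source B: (key, trigger set, collect set)
def pvTable : List (String × List String × List String) :=
  [("theme:night", ["night", "dark", "moon"], ["night", "moon"]),
   ("theme:day", ["sun", "dawn", "bright"], ["sun", "dawn", "bright"]),
   ("element:water", ["water", "lake", "river", "ocean"], ["water", "lake", "river", "ocean"]),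
   ("element:earth", ["mountain", "rock", "stone"], ["mountain", "rock", "stone"]),
   ("mood:calm", ["calm", "serene", "quiet"], ["calm", "serene", "quiet"]),
   ("mood:intense", ["storm", "loud", "intense"], ["storm", "loud", "intense"])]

-- the body of Source B's inner `for entry in state` loop, applied to one state entry
def pvStep (tok : String) :
    String × List String × List String × Bool × List String →
    String × List String × List String × Bool × List String
  | (key, trig, coll, b, acc) =>
    (key, trig, coll, b || trig.contains tok,
     if coll.contains tok then acc ++ ["token:" ++ tok] else acc)

-- initial state entry built from a table row, and the final dict-comprehension filter of Source B
def pvInit (e : String × List String × List String) :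
    String × List String × List String × Bool × List String :=
  (e.1, e.2.1, e.2.2, false, [])

def pvEmit (e : String × List String × List String × Bool × List String) :
    Option (String × List String) :=
  if e.2.2.2.1 then some (e.1, e.2.2.2.2) else none

def prompt_knowledge_py_alt (prompt : String) : (List (String × List String)) × List String :=
  let tokens := pvTokenise prompt
  let state := pvTable.map pvInit
  let state := tokens.foldl (fun st tok => st.map (pvStep tok)) state
  let knowledge : List (String × List String) := state.filterMap pvEmit
  let facts : PySem.Set String := PySem.Set.ofList (tokens.map (fun tok => "token:" ++ tok))
  (knowledge, facts)

-- ===== PRECONDITION & SPEC =====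
def Spec_prompt_knowledge_py (prompt : String) (out : (List (String × List String)) × List String) : Prop := out = prompt_knowledge_py_alt prompt
instance (prompt : String) (out : (List (String × List String)) × List String) : Decidable (Spec_prompt_knowledge_py prompt out) := by unfold Spec_prompt_knowledge_py; infer_instance

-- ===== CLAIM (what is proved, stated in full; the proofs are below) =====
def Claim_equal_prompt_knowledge_py : Prop := ∀ (prompt : String), Dom_prompt_knowledge_py prompt → Spec_prompt_knowledge_py prompt (prompt_knowledge_py prompt)

-- ===== LEMMAS AND PROOFS =====

-- folding a map-step over a mapped list is the map of the per-element folds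
theorem pv_foldl_map_comm {α σ τ : Type} (g : τ → σ → σ) (l : List α) :
    ∀ (toks : List τ) (h : α → σ),
      toks.foldl (fun st t => st.map (g t)) (l.map h)
        = l.map (fun x => toks.foldl (fun s t => g t s) (h x)) := by
  intro toks
  induction toks with
  | nil => intro h; rfl
  | cons t ts ih =>
    intro h
    simp only [List.foldl_cons, List.map_map]
    exact ih (fun x => g t (h x))

-- per-entry characterisation of Source B's inner loop body folded over the tokens
theorem pv_foldl_step (key : String) (trig coll : List String) :
    ∀ (toks : List String) (b : Bool) (acc : List String),
      toks.foldl (fun s t => pvStep t s) (key, trig, coll, b, acc)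
        = (key, trig, coll, b || toks.any (fun t => trig.contains t),
           acc ++ (toks.filter (fun t => coll.contains t)).map (fun t => "token:" ++ t)) := by
  intro toks
  induction toks with
  | nil => intro b acc; simp
  | cons t ts ih =>
    intro b acc
    rw [List.foldl_cons,
      show pvStep t (key, trig, coll, b, acc)
        = (key, trig, coll, b || trig.contains t,
           if coll.contains t then acc ++ ["token:" ++ t] else acc) from rfl, ih,
      List.any_cons, Bool.or_assoc, List.filter_cons]
    cases hc : coll.contains t <;> simp

-- the folded state, characterised row by row
theorem pv_state_eq (tokens : List String) :
    tokens.foldl (fun st tok => st.map (pvStep tok)) (pvTable.map pvInit)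
      = pvTable.map (fun e =>
          (e.1, e.2.1, e.2.2, tokens.any (fun t => e.2.1.contains t),
           (tokens.filter (fun t => e.2.2.contains t)).map (fun t => "token:" ++ t))) := by
  rw [pv_foldl_map_comm]
  apply List.map_congr_left
  intro e _
  obtain ⟨key, trig, coll⟩ := e
  exact pv_foldl_step key trig coll tokens false []

-- the two function bodies agree for an arbitrary token list (tokens abstracted out)
theorem pv_bodies_eq (tokens : List String) :
  (
  let facts : PySem.Set String := PySem.Set.ofList (tokens.map (fun token => "token:" ++ token))
  let knowledge : PySem.Dict String (List String) := PySem.Dict.empty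
  let knowledge :=
    if tokens.any (fun token => (["night", "dark", "moon"] : List String).contains token) then
      knowledge.insert "theme:night"
        ((tokens.filter (fun token => (["night", "moon"] : List String).contains token)).map
          (fun token => "token:" ++ token))
    else knowledge
  let knowledge :=
    if tokens.any (fun token => (["sun", "dawn", "bright"] : List String).contains token) then
      knowledge.insert "theme:day"
        ((tokens.filter (fun token => (["sun", "dawn", "bright"] : List String).contains token)).map
          (fun token => "token:" ++ token))
    else knowledge
  let knowledge :=
    if tokens.any (fun token => (["water", "lake", "river", "ocean"] : List String).contains token) then
      knowledge.insert "element:water"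
        ((tokens.filter (fun token => (["water", "lake", "river", "ocean"] : List String).contains token)).map
          (fun token => "token:" ++ token))
    else knowledge
  let knowledge :=
    if tokens.any (fun token => (["mountain", "rock", "stone"] : List String).contains token) then
      knowledge.insert "element:earth"
        ((tokens.filter (fun token => (["mountain", "rock", "stone"] : List String).contains token)).map
          (fun token => "token:" ++ token))
    else knowledge
  let knowledge :=
    if tokens.any (fun token => (["calm", "serene", "quiet"] : List String).contains token) then
      knowledge.insert "mood:calm"
        ((tokens.filter (fun token => (["calm", "serene", "quiet"] : List String).contains token)).map
          (fun token => "token:" ++ token))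
    else knowledge
  let knowledge :=
    if tokens.any (fun token => (["storm", "loud", "intense"] : List String).contains token) then
      knowledge.insert "mood:intense"
        ((tokens.filter (fun token => (["storm", "loud", "intense"] : List String).contains token)).map
          (fun token => "token:" ++ token))
    else knowledge
  (knowledge.items, facts))
  = (((tokens.foldl (fun st tok => st.map (pvStep tok)) (pvTable.map pvInit)).filterMap pvEmit),
     (PySem.Set.ofList (tokens.map (fun tok => "token:" ++ tok)) : PySem.Set String)) := by
  simp only [pv_state_eq]
  simp only [pvTable, List.map_cons, List.map_nil, List.filterMap_cons, List.filterMap_nil,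
    pvEmit]
  split_ifs <;> rfl

-- ===== VERDICT (by name: the statement is the Claim_ definition above) =====
theorem prompt_knowledge_py_spec : Claim_equal_prompt_knowledge_py := by
  intro prompt _
  exact pv_bodies_eq (pvTokenise prompt)
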